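-- pv_equiv track=rewrite | github.com/Hassan-Mehmood-prog/Syntecxhub_-Projects | data_prep.py | normalize_col_name
-- ===== SOURCE A (Python) =====
-- def normalize_col_name(name: str) -> str:
--     """Normalize column name: strip, lower, replace spaces and special chars with underscore."""
--     name = str(name).strip()
--     # replace spaces and many punctuation with underscore
--     name = (
--         name.replace(" ", "_")
--         .replace("-", "_")
--         .replace("/", "_")
--         .replace("\\", "_")
--         .replace(".", "_")
--     )
--     # collapse multiple underscores
--     while "__" in name:
--         name = name.replace("__", "_")
--     return name.lower()
-- ===== SOURCE B (Python) =====
-- def normalize_col_name(name: str) -> str: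
--     """Single pass: strip, translate specials to '_', collapse runs of '_' on the fly, lower."""
--     name = str(name).strip()
--     out = []
--     for ch in name:
--         if ch in " -/\\.":
--             ch = "_"
--         if ch == "_" and out and out[-1] == "_":
--             continue
--         out.append(ch)
--     return "".join(out).lower()
-- ===== Notes on version B (the rewrite author's own statement) =====
-- stated objective: simpler
-- what changed: Replaced the five sequential replace passes plus the repeated while-loop that collapses doubled underscores with a single character scan that translates specials to underscore and suppresses an underscore whenever the previously emitted character is an underscore.
import Mathlib
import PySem

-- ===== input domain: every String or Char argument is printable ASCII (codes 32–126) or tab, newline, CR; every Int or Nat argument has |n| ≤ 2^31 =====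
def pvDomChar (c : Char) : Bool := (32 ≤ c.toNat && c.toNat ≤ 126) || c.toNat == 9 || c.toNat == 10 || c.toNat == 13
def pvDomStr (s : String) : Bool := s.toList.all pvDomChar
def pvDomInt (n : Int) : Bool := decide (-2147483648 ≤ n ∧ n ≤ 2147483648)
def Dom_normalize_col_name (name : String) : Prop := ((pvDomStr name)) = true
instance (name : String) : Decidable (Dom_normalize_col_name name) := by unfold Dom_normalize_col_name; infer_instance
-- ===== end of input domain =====

-- B replaces A's five replace passes + repeated '__'→'_' passes by ONE stateful scan (objective: simpler, O(n)).
-- ===== PORT A =====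
-- A-side helpers: the lemmas below are needed only to justify termination of A's `while "__" in name` loop
-- (each replace("__","_") pass strictly shortens the string while "__" occurs in it).

-- halving of one replace("__","_") pass, as `PySem.Chars.replace.go` performs it
def pvHalf : List Char → List Char
  | '_' :: '_' :: t => '_' :: pvHalf t
  | c :: t => c :: pvHalf t
  | [] => []

def pvHasDD : List Char → Bool
  | a :: b :: t => (a == '_' && b == '_') || pvHasDD (b :: t)
  | _ => false

theorem pv_infix_iff_hasDD (l : List Char) : (['_','_'] <:+: l) ↔ pvHasDD l = true := by
  induction l using pvHasDD.induct with
  | case1 a b t ih =>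
      rw [List.infix_cons_iff, pvHasDD]
      simp [List.cons_prefix_cons, ih]
      tauto
  | case2 l hshape =>
      cases l with
      | nil => simp [pvHasDD]
      | cons a t =>
        cases t with
        | nil =>
          simp [pvHasDD]
          rintro ⟨r, t, hr⟩
          have := congrArg List.length hr; simp at this; omega
        | cons b t' => exact (hshape a b t' rfl).elim

theorem pv_go_dd : ∀ (fuel : Nat) (l acc : List Char), l.length ≤ fuel →
    PySem.Chars.replace.go ['_','_'] ['_'] fuel l acc = acc.reverse ++ pvHalf l := by
  intro fuel
  induction fuel with
  | zero => intro l acc h; simp at h; subst h; simp [PySem.Chars.replace.go, pvHalf]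
  | succ f ih =>
    intro l acc h
    cases l with
    | nil => simp [PySem.Chars.replace.go, pvHalf]
    | cons c t =>
      simp at h
      by_cases hc : c = '_'
      · subst hc
        cases t with
        | nil => simp [PySem.Chars.replace.go, List.isPrefixOf, pvHalf, ih [] _ (by omega)]
        | cons d t' =>
          by_cases hd : d = '_'
          · subst hd
            rw [PySem.Chars.replace.go]
            simp at h
            simp [List.isPrefixOf, pvHalf, ih t' ('_' :: acc) (by omega)]
          · rw [PySem.Chars.replace.go]
            simp at h
            simp [List.isPrefixOf, hd, pvHalf, ih (d :: t') _ (by simp; omega)]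
            intro h'; exact absurd h'.symm hd
      · rw [PySem.Chars.replace.go]
        simp [List.isPrefixOf, hc, pvHalf, ih t _ (by omega)]
        intro h'; exact absurd h'.symm hc

theorem pv_replace_dd (l : List Char) :
    PySem.Chars.replace l ['_','_'] ['_'] = pvHalf l := by
  rw [PySem.Chars.replace]
  simp [pv_go_dd l.length l [] le_rfl]

theorem pvHasDD_cons (c : Char) (t : List Char)
    (hshape : ∀ (tail : List Char), c = '_' → t = '_' :: tail → False) :
    pvHasDD (c :: t) = pvHasDD t := by
  cases t with
  | nil => simp [pvHasDD]
  | cons d t' =>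
    rw [pvHasDD]
    by_cases hc : c = '_'
    · by_cases hd : d = '_'
      · exact (hshape t' hc (by rw [hd])).elim
      · simp [hd]
    · simp [hc]

theorem pvHalf_length_le (l : List Char) : (pvHalf l).length ≤ l.length := by
  induction l using pvHalf.induct <;> simp [pvHalf, *] <;> omega

theorem pvHalf_length_lt (l : List Char) (h : pvHasDD l = true) :
    (pvHalf l).length < l.length := by
  induction l using pvHalf.induct with
  | case1 t _ => have := pvHalf_length_le t; simp [pvHalf]; omega
  | case2 c t hshape ih =>
      rw [pvHasDD_cons c t hshape] at h
      simp [pvHalf]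
      exact ih h
  | case3 => simp [pvHasDD] at h

theorem pv_replace_dd_shrinks (s : String) (h : PySem.Str.isIn "__" s = true) :
    (PySem.Str.replace s "__" "_").toList.length < s.toList.length := by
  have h2 : pvHasDD s.toList = true := by
    rw [← pv_infix_iff_hasDD]
    have := (PySem.Str.isIn_iff_infix (sub := "__") (s := s)).mp h
    simpa using this
  calc (PySem.Str.replace s "__" "_").toList.length
      = (pvHalf s.toList).length := by
        rw [PySem.Str.toList_replace]
        simp [pv_replace_dd]
    _ < s.toList.length := pvHalf_length_lt _ h2

-- the `while "__" in name:` loop of A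
def pvWhileA (s : String) : String :=
  if PySem.Str.isIn "__" s then pvWhileA (PySem.Str.replace s "__" "_") else s
termination_by s.toList.length
decreasing_by exact pv_replace_dd_shrinks s (by assumption)

def normalize_col_name (name : String) : String :=
  let n := PySem.Str.strip name
  let n := PySem.Str.replace (PySem.Str.replace (PySem.Str.replace (PySem.Str.replace
             (PySem.Str.replace n " " "_") "-" "_") "/" "_") "\\" "_") "." "_"
  PySem.Str.lower (pvWhileA n)

-- ===== PORT B =====
def pvTr (c : Char) : Char :=
  if c = ' ' || c = '-' || c = '/' || c = '\\' || c = '.' then '_' else c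

def normalize_col_name_alt (name : String) : String :=
  let s := PySem.Str.strip name
  let out := s.toList.foldl
    (fun acc ch =>
      let d := pvTr ch
      if d = '_' && acc.head? == some '_' then acc else d :: acc) []
  PySem.Str.lower (String.ofList out.reverse)

-- ===== PRECONDITION & SPEC =====
def Spec_normalize_col_name (name : String) (out : String) : Prop := out = normalize_col_name_alt name
instance (name : String) (out : String) : Decidable (Spec_normalize_col_name name out) := by unfold Spec_normalize_col_name; infer_instance

-- ===== CLAIM (what is proved, stated in full; the proofs are below) =====
def Claim_equal_normalize_col_name : Prop := ∀ (name : String), Dom_normalize_col_name name → Spec_normalize_col_name name (normalize_col_name name)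

-- ===== LEMMAS AND PROOFS =====

-- a single-character replace(a, "_") is a map
theorem pv_go_single (a : Char) : ∀ (fuel : Nat) (l acc : List Char), l.length ≤ fuel →
    PySem.Chars.replace.go [a] ['_'] fuel l acc
      = acc.reverse ++ l.map (fun c => if c = a then '_' else c) := by
  intro fuel
  induction fuel with
  | zero => intro l acc h; simp at h; subst h; simp [PySem.Chars.replace.go]
  | succ f ih =>
    intro l acc h
    cases l with
    | nil => simp [PySem.Chars.replace.go]
    | cons c t =>
      by_cases hc : c = a
      · subst hc
        rw [PySem.Chars.replace.go]
        simp [List.isPrefixOf, ih t _ (by simpa using h)]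
      · rw [PySem.Chars.replace.go]
        simp [List.isPrefixOf, hc, ih t _ (by simpa using h)]
        intro h'; exact absurd h'.symm hc

theorem pv_replace_single (a : Char) (l : List Char) :
    PySem.Chars.replace l [a] ['_'] = l.map (fun c => if c = a then '_' else c) := by
  rw [PySem.Chars.replace]
  simp [pv_go_single a l.length l [] le_rfl]

-- A's five replace passes are exactly `map pvTr`
theorem pv_five_replaces (s : String) :
    (PySem.Str.replace (PySem.Str.replace (PySem.Str.replace (PySem.Str.replace
       (PySem.Str.replace s " " "_") "-" "_") "/" "_") "\\" "_") "." "_").toList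
      = s.toList.map pvTr := by
  simp only [PySem.Str.toList_replace]
  have hsp : (" " : String).toList = [' '] := by decide
  have hhy : ("-" : String).toList = ['-'] := by decide
  have hsl : ("/" : String).toList = ['/'] := by decide
  have hbs : ("\\" : String).toList = ['\\'] := by decide
  have hdo : ("." : String).toList = ['.'] := by decide
  have hu : ("_" : String).toList = ['_'] := by decide
  rw [hsp, hhy, hsl, hbs, hdo, hu]
  simp only [pv_replace_single, List.map_map]
  apply List.map_congr_left
  intro c _
  simp only [Function.comp, pvTr]
  by_cases h1 : c = ' ' <;> by_cases h2 : c = '-' <;> by_cases h3 : c = '/' <;>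
    by_cases h4 : c = '\\' <;> by_cases h5 : c = '.' <;> simp_all

-- B's collapsing fold, on the already-translated characters
def pvStep (acc : List Char) (d : Char) : List Char :=
  if d = '_' && acc.head? == some '_' then acc else d :: acc

theorem pv_fold_fix : ∀ (l acc : List Char), pvHasDD l = false →
    (acc.head? = some '_' → l.head? ≠ some '_') →
    l.foldl pvStep acc = l.reverse ++ acc := by
  intro l
  induction l with
  | nil => intro acc _ _; simp
  | cons c t ih =>
    intro acc hdd hhd
    have hstep : pvStep acc c = c :: acc := by
      unfold pvStep
      by_cases hc : c = '_'
      · have : acc.head? ≠ some '_' := fun h => hhd h (by simp [hc])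
        simp [hc]
        intro h; exact absurd h this
      · simp [hc]
    have hddt : pvHasDD t = false := by
      cases t with
      | nil => simp [pvHasDD]
      | cons d t' =>
        rw [pvHasDD] at hdd
        simp at hdd
        exact hdd.2
    have hhdt : (c :: acc).head? = some '_' → t.head? ≠ some '_' := by
      intro hc1
      simp at hc1
      cases t with
      | nil => simp
      | cons d t' =>
        rw [pvHasDD] at hdd
        simp [hc1] at hdd
        simp [hdd.1]
    simp only [List.foldl_cons, hstep, ih (c :: acc) hddt hhdt]
    simp

theorem pv_fold_half (l : List Char) : ∀ (acc : List Char),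
    (pvHalf l).foldl pvStep acc = l.foldl pvStep acc := by
  induction l using pvHalf.induct with
  | case1 t ih =>
    intro acc
    have hmid : pvStep (pvStep acc '_') '_' = pvStep acc '_' := by
      unfold pvStep
      by_cases h : acc.head? = some '_' <;> simp [h]
    simp only [pvHalf, List.foldl_cons, hmid, ih]
  | case2 c t hshape ih =>
    intro acc
    simp only [pvHalf, List.foldl_cons, ih]
  | case3 => intro acc; rfl

-- A's while-loop computes the same collapsed list as B's fold
theorem pv_while_eq_fold (s : String) :
    (pvWhileA s).toList = (s.toList.foldl pvStep []).reverse := by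
  generalize hn : s.toList.length = n
  induction n using Nat.strong_induction_on generalizing s with
  | _ n ih =>
    rw [pvWhileA]
    by_cases h : PySem.Str.isIn "__" s = true
    · rw [if_pos h]
      have hlen := pv_replace_dd_shrinks s h
      rw [ih _ (by omega) _ rfl]
      have : (PySem.Str.replace s "__" "_").toList = pvHalf s.toList := by
        rw [PySem.Str.toList_replace]
        simp [pv_replace_dd]
      rw [this, pv_fold_half]
    · rw [if_neg h]
      have hdd : pvHasDD s.toList = false := by
        rw [← Bool.not_eq_true, ← pv_infix_iff_hasDD]
        intro hinf
        exact absurd ((PySem.Str.isIn_iff_infix (sub := "__") (s := s)).mpr (by simpa using hinf)) h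
      rw [pv_fold_fix s.toList [] hdd (by simp)]
      simp

-- ===== VERDICT (by name: the statement is the Claim_ definition above) =====
theorem normalize_col_name_spec : Claim_equal_normalize_col_name := by
  intro name _
  unfold Spec_normalize_col_name normalize_col_name normalize_col_name_alt
  apply String.toList_inj.mp
  simp only [PySem.Str.toList_lower]
  apply congrArg PySem.Chars.lower
  rw [String.toList_ofList, pv_while_eq_fold, pv_five_replaces, List.foldl_map]
  simp only [pvStep]
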